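-- pv_equiv track=rewrite | github.com/anupamck/advent-of-code-2023 | advent_of_code_2023/solutions/day15.py | count_steps_to_destination
-- ===== SOURCE A (Python) =====
-- def count_steps_to_destination(map, directions):
--     current_location = 'AAA'
--     steps = 0
--     while current_location != 'ZZZ':
--         for direction in directions:
--             steps += 1
--             if direction == 'L':
--                 current_location = map[current_location][0]
--             else:
--                 current_location = map[current_location][1]
--             if current_location == 'ZZZ':
--                 break
--     return steps
-- ===== SOURCE B (Python) =====
-- def count_steps_to_destination(map, directions):
--     n = len(directions)
--
--     def one_pass(node):
--         # effect of one full pass of the direction string starting at node: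
--         # (True, k) if ZZZ is hit at step k within the pass, else (False, end node)
--         k = 0
--         for d in directions:
--             i = 0 if d == 'L' else 1
--             if node not in map or len(map[node]) <= i:
--                 break
--             node = map[node][i]
--             k += 1
--             if node == 'ZZZ':
--                 return (True, k)
--         return (False, node)
--
--     table = {node: one_pass(node) for node in map}
--     current = 'AAA'
--     passes = 0
--     while current != 'ZZZ':
--         hit, value = table[current]
--         if hit:
--             return passes * n + value
--         current = value
--         passes += 1
--     return passes * n
-- ===== Notes on version B (the rewrite author's own statement) =====
-- stated objective: alternative
-- what changed: B precomputes, for every map node, the effect of one full pass of the direction string (a jump table recording either the step offset at which ZZZ is hit or the pass-end node) and then iterates pass-by-pass over that table, instead of A's step-by-step walk with nested loops.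
import Mathlib
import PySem

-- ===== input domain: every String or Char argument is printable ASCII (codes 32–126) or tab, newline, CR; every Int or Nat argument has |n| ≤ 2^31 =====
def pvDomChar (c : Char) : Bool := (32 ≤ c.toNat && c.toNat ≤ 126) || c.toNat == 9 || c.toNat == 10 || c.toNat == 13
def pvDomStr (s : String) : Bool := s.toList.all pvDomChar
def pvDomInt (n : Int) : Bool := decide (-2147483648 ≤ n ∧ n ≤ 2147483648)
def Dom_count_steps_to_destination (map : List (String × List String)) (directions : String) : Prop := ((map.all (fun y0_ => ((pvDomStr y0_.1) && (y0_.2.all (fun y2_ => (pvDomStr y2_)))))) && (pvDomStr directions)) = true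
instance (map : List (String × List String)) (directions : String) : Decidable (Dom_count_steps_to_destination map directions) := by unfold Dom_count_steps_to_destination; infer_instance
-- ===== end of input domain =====

-- B precomputes a per-node jump table for one full pass of the direction string and then
-- iterates pass-by-pass over that table, instead of A's step-by-step nested-loop walk.
-- Python's while loops have no bound; both ports totalize them with a fuel parameter that
-- Pre_ guarantees is sufficient (fuel exhaustion yields the unreachable default 0).

-- ===== PORT A =====
-- one move: map[cur][0] for 'L', map[cur][1] otherwise; none = KeyError/IndexError
def pvMoveA (map : List (String × List String)) (c : Char) (cur : String) : Option String :=
  match map.find? (fun p => p.1 == cur) with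
  | none => none
  | some p => PySem.List.pyGet? p.2 (if c = 'L' then 0 else 1)

-- the inner 'for direction in directions' with its break on reaching 'ZZZ'
def pvInnerA (map : List (String × List String)) : List Char → Nat → String → Option (Nat × String)
  | [], steps, cur => some (steps, cur)
  | c :: ds, steps, cur =>
    match pvMoveA map c cur with
    | none => none
    | some nxt => if nxt = "ZZZ" then some (steps + 1, nxt) else pvInnerA map ds (steps + 1) nxt

-- the outer 'while current_location != ZZZ' (fuel counts passes)
def pvOuterA (map : List (String × List String)) (dl : List Char) : Nat → Nat → String → Option Nat
  | 0, _, _ => none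
  | f + 1, steps, cur =>
    if cur = "ZZZ" then some steps
    else
      match pvInnerA map dl steps cur with
      | none => none
      | some (s', cur') => pvOuterA map dl f s' cur'

def count_steps_to_destination (map : List (String × List String)) (directions : String) : Int :=
  match pvOuterA map directions.toList (map.length + 2) 0 "AAA" with
  | some s => (s : Int)
  | none => 0

-- ===== PORT B =====
-- Source B's one_pass: the effect of one full pass of the directions starting at node;
-- .inl k models Python's (True, k) (ZZZ hit at step k), .inr node models (False, node).
-- Python's 'node not in map or len(map[node]) <= i' guard + 'map[node][i]' is ported as
-- find? + pyGet? (exact: for i ∈ {0,1} pyGet? is none exactly when len ≤ i).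
def pvOnePass (map : List (String × List String)) : List Char → Nat → String → Sum Nat String
  | [], _, node => .inr node
  | d :: ds, k, node =>
    match map.find? (fun p => p.1 == node) with
    | none => .inr node
    | some p =>
      match PySem.List.pyGet? p.2 (if d = 'L' then 0 else 1) with
      | none => .inr node
      | some nxt => if nxt = "ZZZ" then .inl (k + 1) else pvOnePass map ds (k + 1) nxt

-- Source B's table = {node: one_pass(node) for node in map}
def pvTable (map : List (String × List String)) (dl : List Char) : List (String × Sum Nat String) :=
  map.map (fun p => (p.1, pvOnePass map dl 0 p.1))

-- Source B's 'while current != ZZZ' over the table (fuel counts passes)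
def pvOuterB (table : List (String × Sum Nat String)) (n : Nat) : Nat → Nat → String → Option Nat
  | 0, _, _ => none
  | f + 1, passes, cur =>
    if cur = "ZZZ" then some (passes * n)
    else
      match table.find? (fun p => p.1 == cur) with
      | none => none
      | some p =>
        match p.2 with
        | .inl k => some (passes * n + k)
        | .inr nxt => pvOuterB table n f (passes + 1) nxt

def count_steps_to_destination_alt (map : List (String × List String)) (directions : String) : Int :=
  let dl := directions.toList
  match pvOuterB (pvTable map dl) dl.length (map.length + 2) 0 "AAA" with
  | some s => (s : Int)
  | none => 0

-- ===== PRECONDITION & SPEC =====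
-- Bounded-reachability check used only by Pre_ (independent of both ports): does the
-- direction walk from 'AAA' reach 'ZZZ' within f moves, with every lookup defined?
def pvReach (map : List (String × List String)) (dl : List Char) : Nat → Nat → String → Bool
  | 0, _, _ => false
  | f + 1, steps, cur =>
    if cur = "ZZZ" then true
    else
      match dl[steps % dl.length]? with
      | none => false
      | some c =>
        match map.find? (fun p => p.1 == cur) with
        | none => false
        | some p =>
          match PySem.List.pyGet? p.2 (if c = 'L' then 0 else 1) with
          | none => false
          | some nxt => pvReach map dl f (steps + 1) nxt

-- Pre_ = exactly the inputs on which A returns: the walk reaches 'ZZZ' with no failed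
-- lookup. By pigeonhole on (location, position-in-directions) states, a walk that has not
-- reached 'ZZZ' within (|map|+1)*|directions| moves never will (A diverges; with empty
-- directions A also diverges); so this bounded check is equivalent to A's termination —
-- halting has no unbounded closed form.
def Pre_count_steps_to_destination (map : List (String × List String)) (directions : String) : Prop :=
  pvReach map directions.toList ((map.length + 1) * directions.toList.length + 1) 0 "AAA" = true

instance (map : List (String × List String)) (directions : String) : Decidable (Pre_count_steps_to_destination map directions) := by
  unfold Pre_count_steps_to_destination; infer_instance

def pvWitness_count_steps_to_destination : (List (String × List String)) × String :=
  ([("AAA", ["BBB", "CCC"]), ("BBB", ["ZZZ", "AAA"]), ("CCC", ["AAA", "ZZZ"])], "RRL")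

def Spec_count_steps_to_destination (map : List (String × List String)) (directions : String) (out : Int) : Prop := out = count_steps_to_destination_alt map directions
instance (map : List (String × List String)) (directions : String) (out : Int) : Decidable (Spec_count_steps_to_destination map directions out) := by unfold Spec_count_steps_to_destination; infer_instance

-- ===== CLAIM (what is proved, stated in full; the proofs are below) =====
def Claim_equal_count_steps_to_destination : Prop := ∀ (map : List (String × List String)) (directions : String), Dom_count_steps_to_destination map directions → Pre_count_steps_to_destination map directions → Spec_count_steps_to_destination map directions (count_steps_to_destination map directions)

-- ===== LEMMAS AND PROOFS =====

-- proof-only helper: the walk of pvReach, returning its step count (pvReach's Option shadow)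
def pvFlatWalk (map : List (String × List String)) (dl : List Char) : Nat → Nat → String → Option Nat
  | 0, _, _ => none
  | f + 1, steps, cur =>
    if cur = "ZZZ" then some steps
    else
      match dl[steps % dl.length]? with
      | none => none
      | some c =>
        match map.find? (fun p => p.1 == cur) with
        | none => none
        | some p =>
          match PySem.List.pyGet? p.2 (if c = 'L' then 0 else 1) with
          | none => none
          | some nxt => pvFlatWalk map dl f (steps + 1) nxt

theorem pvReach_eq_isSome (map : List (String × List String)) (dl : List Char) :
    ∀ f s cur, pvReach map dl f s cur = (pvFlatWalk map dl f s cur).isSome := by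
  intro f
  induction f with
  | zero => intro s cur; rfl
  | succ f ih =>
    intro s cur
    simp only [pvReach, pvFlatWalk]
    split
    · rfl
    · cases h1 : dl[s % dl.length]? with
      | none => rfl
      | some c =>
        cases h2 : map.find? (fun p => p.1 == cur) with
        | none => rfl
        | some p =>
          cases h3 : PySem.List.pyGet? p.2 (if c = 'L' then 0 else 1) with
          | none => simp [h3]
          | some nxt => simp only [h3]; exact ih (s + 1) nxt

-- a completed inner pass either broke at 'ZZZ' or consumed all directions
theorem pvInnerA_steps (map : List (String × List String)) :
    ∀ ds s cur s' cur', pvInnerA map ds s cur = some (s', cur') →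
      cur' = "ZZZ" ∨ (s' = s + ds.length ∧ cur' ≠ "ZZZ") := by
  intro ds
  induction ds with
  | nil =>
    intro s cur s' cur' h
    simp only [pvInnerA, Option.some.injEq, Prod.mk.injEq] at h
    obtain ⟨h1, h2⟩ := h
    by_cases hz : cur' = "ZZZ"
    · exact Or.inl hz
    · exact Or.inr ⟨by simp only [List.length_nil]; omega, hz⟩
  | cons c ds ih =>
    intro s cur s' cur' h
    simp only [pvInnerA] at h
    cases hm : pvMoveA map c cur with
    | none => rw [hm] at h; exact absurd h (by simp)
    | some nxt =>
      rw [hm] at h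
      dsimp only at h
      by_cases hz : nxt = "ZZZ"
      · rw [if_pos hz] at h
        simp only [Option.some.injEq, Prod.mk.injEq] at h
        exact Or.inl (h.2 ▸ hz)
      · rw [if_neg hz] at h
        rcases ih (s + 1) nxt s' cur' h with h1 | ⟨h2, h3⟩
        · exact Or.inl h1
        · exact Or.inr ⟨by simp only [List.length_cons]; omega, h3⟩

-- one full inner pass of A, seen through the flat walk
theorem pvInnerA_pvFlatWalk (map : List (String × List String)) (dl : List Char) :
    ∀ ds f s cur, cur ≠ "ZZZ" →
      (ds ≠ [] → s % dl.length = dl.length - ds.length ∧ dl.drop (dl.length - ds.length) = ds) →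
      pvFlatWalk map dl (ds.length + f + 1) s cur =
        (match pvInnerA map ds s cur with
         | none => none
         | some (s', cur') => if cur' = "ZZZ" then some s' else pvFlatWalk map dl (f + 1) s' cur') := by
  intro ds
  induction ds with
  | nil =>
    intro f s cur hcur _
    simp [pvInnerA, if_neg hcur]
  | cons c ds ih =>
    intro f s cur hcur hidx
    obtain ⟨hmod, hdrop⟩ := hidx (by simp)
    have hlen : dl.length = (dl.length - (c :: ds).length) + ds.length + 1 := by
      have h0 := congrArg List.length hdrop
      rw [List.length_drop] at h0
      simp only [List.length_cons] at h0 ⊢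
      omega
    have hget : dl[s % dl.length]? = some c := by
      rw [hmod]
      have h1 : (dl.drop (dl.length - (c :: ds).length))[0]? = some c := by rw [hdrop]; rfl
      rw [List.getElem?_drop] at h1
      simpa using h1
    simp only [List.length_cons]
    conv_lhs => simp only [pvFlatWalk]
    rw [if_neg hcur, hget]
    conv_rhs => simp only [pvInnerA, pvMoveA]
    cases h2 : map.find? (fun p => p.1 == cur) with
    | none => rfl
    | some p =>
      dsimp only
      cases h3 : PySem.List.pyGet? p.2 (if c = 'L' then 0 else 1) with
      | none => rfl
      | some nxt =>
        dsimp only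
        by_cases hz : nxt = "ZZZ"
        · subst hz
          rw [show ds.length + 1 + f = (ds.length + f) + 1 from by omega]
          simp [pvFlatWalk]
        · rw [if_neg hz]
          rw [show ds.length + 1 + f = ds.length + f + 1 from by omega]
          exact ih f (s + 1) nxt hz (by
            intro hne
            have hds1 : 1 ≤ ds.length := by
              rcases List.exists_cons_of_ne_nil hne with ⟨d, ds', rfl⟩
              simp
            have hsub : dl.length - ds.length = (dl.length - (c :: ds).length) + 1 := by
              simp only [List.length_cons] at hlen ⊢
              omega
            constructor
            · have hq := Nat.div_add_mod s dl.length
              have hlt : (dl.length - (c :: ds).length) + 1 < dl.length := by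
                simp only [List.length_cons] at hlen ⊢
                omega
              have hs1 : s + 1 = dl.length * (s / dl.length) + ((dl.length - (c :: ds).length) + 1) := by
                omega
              rw [hs1, Nat.mul_add_mod, Nat.mod_eq_of_lt hlt, hsub]
            · rw [hsub, ← List.drop_drop, hdrop]
              rfl)

-- success of the flat walk at a pass boundary transfers to A's nested loop
theorem pvFlatWalk_to_pvOuterA (map : List (String × List String)) (dl : List Char) :
    ∀ f s cur r, s % dl.length = 0 → pvFlatWalk map dl (f * dl.length + 1) s cur = some r →
      pvOuterA map dl (f + 1) s cur = some r := by
  intro f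
  induction f with
  | zero =>
    intro s cur r _ h
    simp only [Nat.zero_mul, Nat.zero_add] at h
    by_cases hz : cur = "ZZZ"
    · subst hz
      simp [pvFlatWalk] at h
      simp [pvOuterA, h]
    · exfalso
      simp only [pvFlatWalk, if_neg hz] at h
      cases h1 : dl[s % dl.length]? with
      | none => rw [h1] at h; simp at h
      | some c =>
        rw [h1] at h; dsimp only at h
        cases h2 : map.find? (fun p => p.1 == cur) with
        | none => rw [h2] at h; simp at h
        | some p =>
          rw [h2] at h; dsimp only at h
          cases h3 : PySem.List.pyGet? p.2 (if c = 'L' then 0 else 1) with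
          | none => rw [h3] at h; simp at h
          | some nxt => rw [h3] at h; dsimp only at h; simp [pvFlatWalk] at h
  | succ f ih =>
    intro s cur r hmod h
    by_cases hz : cur = "ZZZ"
    · subst hz
      simp [pvFlatWalk] at h
      simp [pvOuterA, h]
    · have hfuel : (f + 1) * dl.length + 1 = dl.length + (f * dl.length) + 1 := by ring
      rw [hfuel] at h
      have hpass := pvInnerA_pvFlatWalk map dl dl (f * dl.length) s cur hz (by
        intro _
        constructor
        · simp [hmod]
        · simp)
      rw [hpass] at h
      cases hi : pvInnerA map dl s cur with
      | none => rw [hi] at h; exact absurd h (by simp)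
      | some q =>
        obtain ⟨s', cur'⟩ := q
        rw [hi] at h
        dsimp only at h
        simp only [pvOuterA, if_neg hz, hi]
        by_cases hz' : cur' = "ZZZ"
        · rw [if_pos hz'] at h
          simp only [Option.some.injEq] at h
          subst h
          cases f with
          | zero => simp [hz']
          | succ f => simp [hz']
        · rw [if_neg hz'] at h
          rcases pvInnerA_steps map dl s cur s' cur' hi with hc | ⟨hs', _⟩
          · exact absurd hc hz'
          · have hmod' : s' % dl.length = 0 := by
              subst hs'
              simp [hmod]
            exact ih s' cur' r hmod' h

-- A's inner pass seen through B's one_pass: same break point, same end node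
theorem pvInnerA_pvOnePass (map : List (String × List String)) :
    ∀ ds s k cur s' cur', cur ≠ "ZZZ" → pvInnerA map ds s cur = some (s', cur') →
      (cur' = "ZZZ" → ∃ j, s' = s + j ∧ pvOnePass map ds k cur = .inl (k + j)) ∧
      (cur' ≠ "ZZZ" → pvOnePass map ds k cur = .inr cur') := by
  intro ds
  induction ds with
  | nil =>
    intro s k cur s' cur' hcur h
    simp only [pvInnerA, Option.some.injEq, Prod.mk.injEq] at h
    obtain ⟨rfl, rfl⟩ := h
    exact ⟨fun hz => absurd hz hcur, fun _ => rfl⟩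
  | cons c ds ih =>
    intro s k cur s' cur' hcur h
    simp only [pvInnerA, pvMoveA] at h
    cases h2 : map.find? (fun p => p.1 == cur) with
    | none => rw [h2] at h; exact absurd h (by simp)
    | some p =>
      rw [h2] at h
      dsimp only at h
      cases h3 : PySem.List.pyGet? p.2 (if c = 'L' then 0 else 1) with
      | none => rw [h3] at h; exact absurd h (by simp)
      | some nxt =>
        rw [h3] at h
        dsimp only at h
        by_cases hz : nxt = "ZZZ"
        · rw [if_pos hz] at h
          simp only [Option.some.injEq, Prod.mk.injEq] at h
          obtain ⟨rfl, rfl⟩ := h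
          refine ⟨fun _ => ⟨1, by omega, ?_⟩, fun hc => absurd hz hc⟩
          simp [pvOnePass, h2, h3, if_pos hz]
        · rw [if_neg hz] at h
          obtain ⟨ha, hb⟩ := ih (s + 1) (k + 1) nxt s' cur' hz h
          constructor
          · intro hzz
            obtain ⟨j, hj1, hj2⟩ := ha hzz
            refine ⟨j + 1, by omega, ?_⟩
            simp only [pvOnePass, h2, h3, if_neg hz]
            rw [hj2]
            congr 1
            omega
          · intro hzz
            simp only [pvOnePass, h2, h3, if_neg hz]
            exact hb hzz

-- the table's lookup is the map's lookup pushed through one_pass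
theorem pvTable_find? (map : List (String × List String)) (dl : List Char) (cur : String) :
    (pvTable map dl).find? (fun p => p.1 == cur) =
      (map.find? (fun p => p.1 == cur)).map (fun p => (p.1, pvOnePass map dl 0 p.1)) := by
  unfold pvTable
  rw [List.find?_map]
  rfl

-- A's nested loop at a pass boundary transfers to B's table loop
theorem pvOuterA_to_pvOuterB (map : List (String × List String)) (dl : List Char)
    (hdl : dl ≠ []) :
    ∀ f passes cur r, pvOuterA map dl f (passes * dl.length) cur = some r →
      pvOuterB (pvTable map dl) dl.length f passes cur = some r := by
  intro f
  induction f with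
  | zero => intro passes cur r h; exact absurd h (by simp [pvOuterA])
  | succ f ih =>
    intro passes cur r h
    by_cases hz : cur = "ZZZ"
    · subst hz
      simp only [pvOuterA] at h
      simp [pvOuterB, ← h]
    · simp only [pvOuterA, if_neg hz] at h
      cases hi : pvInnerA map dl (passes * dl.length) cur with
      | none => rw [hi] at h; exact absurd h (by simp)
      | some q =>
        obtain ⟨s', cur'⟩ := q
        rw [hi] at h
        dsimp only at h
        -- the first step of the successful pass shows cur ∈ map
        have hfind : ∃ p, map.find? (fun p => p.1 == cur) = some p := by
          rcases List.exists_cons_of_ne_nil hdl with ⟨c, ds, rfl⟩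
          simp only [pvInnerA, pvMoveA] at hi
          cases h2 : map.find? (fun p => p.1 == cur) with
          | none => rw [h2] at hi; exact absurd hi (by simp)
          | some p => exact ⟨p, rfl⟩
        obtain ⟨p, hp⟩ := hfind
        have hpcur : p.1 = cur := by
          have := List.find?_some hp
          simpa using this
        obtain ⟨ha, hb⟩ := pvInnerA_pvOnePass map dl (passes * dl.length) 0 cur s' cur' hz hi
        simp only [pvOuterB, if_neg hz, pvTable_find?, hp, Option.map_some]
        by_cases hz' : cur' = "ZZZ"
        · obtain ⟨j, hj1, hj2⟩ := ha hz'
          rw [hpcur, hj2]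
          dsimp only
          -- A: one more outer iteration returns s' (needs f ≥ 1 from h)
          subst hz'
          cases f with
          | zero => exact absurd h (by simp [pvOuterA])
          | succ f =>
            simp [pvOuterA] at h
            subst h
            simp only [Option.some.injEq]
            omega
        · rw [hpcur, hb hz']
          dsimp only
          rcases pvInnerA_steps map dl (passes * dl.length) cur s' cur' hi with hc | ⟨hs', _⟩
          · exact absurd hc hz'
          · have : s' = (passes + 1) * dl.length := by rw [hs']; ring
            rw [this] at h
            exact ih (passes + 1) cur' r h

-- ===== VERDICT (by name: the statement is the Claim_ definition above) =====
theorem count_steps_to_destination_spec : Claim_equal_count_steps_to_destination := by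
  intro map directions _ hPre
  unfold Pre_count_steps_to_destination at hPre
  rw [pvReach_eq_isSome] at hPre
  cases hF : pvFlatWalk map directions.toList ((map.length + 1) * directions.toList.length + 1) 0 "AAA" with
  | none => rw [hF] at hPre; simp at hPre
  | some r =>
    have hdl : directions.toList ≠ [] := by
      intro hnil
      rw [hnil] at hF
      simp [pvFlatWalk] at hF
    have hA : pvOuterA map directions.toList (map.length + 2) 0 "AAA" = some r := by
      have := pvFlatWalk_to_pvOuterA map directions.toList (map.length + 1) 0 "AAA" r (by simp) hF
      simpa using this
    have hB : pvOuterB (pvTable map directions.toList) directions.toList.length (map.length + 2) 0 "AAA" = some r := by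
      have := pvOuterA_to_pvOuterB map directions.toList hdl (map.length + 2) 0 "AAA" r (by simpa using hA)
      exact this
    unfold Spec_count_steps_to_destination count_steps_to_destination count_steps_to_destination_alt
    dsimp only
    rw [hA, hB]
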